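-- pv_equiv track=rewrite | github.com/Jacobmar2/Compass-Wrapped | scripts/fetch_wikimedia_images.py | _is_bad_image_url
-- ===== SOURCE A (Python) =====
-- def _is_bad_image_url(url: str) -> bool:
--     """Detect common non-photographic / placeholder / disambiguation images."""
--     if not url:
--         return True
--     u = url.lower()
--     bad_keywords = (
--         'disambig', 'disambiguation', 'placeholder', 'noimage', 'commons-logo',
--         'wikimedia-logo', 'logo', 'symbol', 'button', 'map', 'diagram', 'locmap', 'locator'
--     )
--     for k in bad_keywords:
--         if k in u:
--             return True
--     # tiny SVG icons used by templates are also not useful; check for small-width thumbnails ("thumb")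
--     if '/thumb/' in u and u.endswith('.svg') and 'disambig' in u:
--         return True
--     return False
-- ===== SOURCE B (Python) =====
-- def _is_bad_image_url(url: str) -> bool:
--     """Single left-to-right pass with first-character dispatch on a MINIMAL
--     keyword set.  Of A's 13 keywords, 4 are redundant: 'disambiguation'
--     contains 'disambig', 'commons-logo' and 'wikimedia-logo' contain 'logo',
--     and 'locmap' contains 'map', so a URL containing any of the 13 contains
--     one of the remaining 9.  A's trailing '/thumb/...svg...disambig' branch
--     requires 'disambig' and is therefore dead code.  We scan the lowered URL
--     once; at each position we look only at the keywords starting with the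
--     current character (a hand-rolled one-level trie), instead of A's 13
--     independent full-string substring scans."""
--     if not url:
--         return True
--     u = url.lower()
--     for i, c in enumerate(u):
--         if c == 'd':
--             if u.startswith('disambig', i) or u.startswith('diagram', i):
--                 return True
--         elif c == 'p':
--             if u.startswith('placeholder', i):
--                 return True
--         elif c == 'n':
--             if u.startswith('noimage', i):
--                 return True
--         elif c == 'l':
--             if u.startswith('logo', i) or u.startswith('locator', i):
--                 return True
--         elif c == 's':
--             if u.startswith('symbol', i):
--                 return True
--         elif c == 'b':
--             if u.startswith('button', i):
--                 return True
--         elif c == 'm':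
--             if u.startswith('map', i):
--                 return True
--     return False
-- ===== Notes on version B (the rewrite author's own statement) =====
-- stated objective: alternative
-- what changed: B replaces A's 13 independent substring scans by one single left-to-right pass over the lowered URL with a first-character dispatch (one-level trie) over a minimal 9-keyword set, the 4 keywords subsumed by others ('disambiguation'>'disambig', 'commons-logo'/'wikimedia-logo'>'logo', 'locmap'>'map') and A's dead SVG branch removed.
import Mathlib
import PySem

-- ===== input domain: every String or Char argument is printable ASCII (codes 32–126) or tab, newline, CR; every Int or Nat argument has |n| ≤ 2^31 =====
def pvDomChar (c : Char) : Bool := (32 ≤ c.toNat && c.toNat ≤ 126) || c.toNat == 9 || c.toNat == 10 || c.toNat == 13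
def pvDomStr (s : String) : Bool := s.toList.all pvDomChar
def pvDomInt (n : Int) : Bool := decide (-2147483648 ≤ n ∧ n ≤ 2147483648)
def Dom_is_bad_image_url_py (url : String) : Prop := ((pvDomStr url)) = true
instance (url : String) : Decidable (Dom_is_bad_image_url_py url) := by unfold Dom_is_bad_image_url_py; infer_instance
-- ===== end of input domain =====

-- B replaces A's 13 independent substring scans by one single pass over the lowered
-- URL with a first-character dispatch over the minimal 9-keyword set (the subsumed
-- keywords and A's dead SVG branch removed); alternative decomposition, not claimed faster.


-- ===== PORT A =====
-- A's keyword tuple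
def badKeywordsA : List String :=
  ["disambig", "disambiguation", "placeholder", "noimage", "commons-logo",
   "wikimedia-logo", "logo", "symbol", "button", "map", "diagram", "locmap", "locator"]

-- the 'for k in bad_keywords' loop with its early return, then the trailing SVG check
def aLoop (u : String) : List String → Bool
  | [] =>
      if PySem.Str.isIn "/thumb/" u && PySem.Str.endswith u ".svg" && PySem.Str.isIn "disambig" u
      then true else false
  | k :: ks => if PySem.Str.isIn k u then true else aLoop u ks

def is_bad_image_url_py (url : String) : Bool :=
  if url = "" then true
  else aLoop (PySem.Str.lower url) badKeywordsA

-- ===== PORT B =====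
-- u.startswith(k, i) on the suffix starting at i
def bPfx (k : String) (l : List Char) : Bool := k.toList.isPrefixOf l

-- the body of B's loop at one position: first-character dispatch (if/elif chain)
def bMatchAt (l : List Char) : Bool :=
  match l with
  | [] => false
  | c :: _ =>
    if c = 'd' then bPfx "disambig" l || bPfx "diagram" l
    else if c = 'p' then bPfx "placeholder" l
    else if c = 'n' then bPfx "noimage" l
    else if c = 'l' then bPfx "logo" l || bPfx "locator" l
    else if c = 's' then bPfx "symbol" l
    else if c = 'b' then bPfx "button" l
    else if c = 'm' then bPfx "map" l
    else false

-- the 'for i, c in enumerate(u)' single pass with early return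
def bScan : List Char → Bool
  | [] => false
  | c :: rest => if bMatchAt (c :: rest) then true else bScan rest

def is_bad_image_url_py_alt (url : String) : Bool :=
  if url = "" then true
  else bScan (PySem.Chars.lower url.toList)

-- ===== PRECONDITION & SPEC =====
def Spec_is_bad_image_url_py (url : String) (out : Bool) : Prop := out = is_bad_image_url_py_alt url
instance (url : String) (out : Bool) : Decidable (Spec_is_bad_image_url_py url out) := by unfold Spec_is_bad_image_url_py; infer_instance

-- ===== CLAIM (what is proved, stated in full; the proofs are below) =====
def Claim_equal_is_bad_image_url_py : Prop := ∀ (url : String), Dom_is_bad_image_url_py url → Spec_is_bad_image_url_py url (is_bad_image_url_py url)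

-- ===== LEMMAS AND PROOFS =====

-- B's minimal keyword set, as char lists (proof-side only)
def min9 : List (List Char) :=
  ["disambig", "placeholder", "noimage", "logo", "symbol", "button", "map",
   "diagram", "locator"].map String.toList

-- A's loop is 'any keyword occurs' OR the trailing SVG condition
lemma aLoop_eq (u : String) (ks : List String) :
    aLoop u ks = (ks.any (fun k => PySem.Str.isIn k u)
      || (PySem.Str.isIn "/thumb/" u && PySem.Str.endswith u ".svg" && PySem.Str.isIn "disambig" u)) := by
  induction ks with
  | nil =>
    show (if _ then true else false) = _
    simp only [List.any_nil, Bool.false_or]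
    cases PySem.Str.isIn "/thumb/" u && PySem.Str.endswith u ".svg" && PySem.Str.isIn "disambig" u <;> rfl
  | cons k ks ih =>
    show (if _ then true else _) = _
    simp only [List.any_cons]
    cases PySem.Str.isIn k u <;> simp [ih]

-- since 'disambig' is among the keywords, the SVG branch is subsumed: A's loop is 'some keyword occurs'
lemma aLoop_iff (u : String) :
    aLoop u badKeywordsA = true ↔ ∃ k ∈ badKeywordsA, PySem.Str.isIn k u = true := by
  rw [aLoop_eq]
  constructor
  · intro h
    rcases Bool.or_eq_true_iff.mp h with h | h
    · exact List.any_eq_true.mp h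
    · exact ⟨"disambig", by decide, (Bool.and_eq_true_iff.mp h).2⟩
  · intro h
    exact Bool.or_eq_true_iff.mpr (Or.inl (List.any_eq_true.mpr h))

-- each of A's 13 keywords contains one of B's 9, and each of the 9 is among the 13:
-- the two 'some keyword occurs' existentials coincide (as infix conditions on char lists)
lemma exists13_iff_exists9 (cs : List Char) :
    (∃ k ∈ badKeywordsA, k.toList <:+: cs) ↔ ∃ k ∈ min9, k <:+: cs := by
  constructor
  · rintro ⟨k, hk, hinf⟩
    fin_cases hk
    · exact ⟨"disambig".toList, by decide, hinf⟩
    · exact ⟨"disambig".toList, by decide, List.IsInfix.trans (by decide) hinf⟩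
    · exact ⟨"placeholder".toList, by decide, hinf⟩
    · exact ⟨"noimage".toList, by decide, hinf⟩
    · exact ⟨"logo".toList, by decide, List.IsInfix.trans (by decide) hinf⟩
    · exact ⟨"logo".toList, by decide, List.IsInfix.trans (by decide) hinf⟩
    · exact ⟨"logo".toList, by decide, hinf⟩
    · exact ⟨"symbol".toList, by decide, hinf⟩
    · exact ⟨"button".toList, by decide, hinf⟩
    · exact ⟨"map".toList, by decide, hinf⟩
    · exact ⟨"diagram".toList, by decide, hinf⟩
    · exact ⟨"map".toList, by decide, List.IsInfix.trans (by decide) hinf⟩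
    · exact ⟨"locator".toList, by decide, hinf⟩
  · rintro ⟨k, hk, hinf⟩
    fin_cases hk
    · exact ⟨"disambig", by decide, hinf⟩
    · exact ⟨"placeholder", by decide, hinf⟩
    · exact ⟨"noimage", by decide, hinf⟩
    · exact ⟨"logo", by decide, hinf⟩
    · exact ⟨"symbol", by decide, hinf⟩
    · exact ⟨"button", by decide, hinf⟩
    · exact ⟨"map", by decide, hinf⟩
    · exact ⟨"diagram", by decide, hinf⟩
    · exact ⟨"locator", by decide, hinf⟩

-- the first-character dispatch checks exactly 'some minimal keyword is a prefix here'
lemma bMatchAt_eq (l : List Char) :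
    bMatchAt l = min9.any (fun k => k.isPrefixOf l) := by
  match l with
  | [] => decide
  | c :: rest =>
    have e0 : ("disambig" : String).toList = ['d', 'i', 's', 'a', 'm', 'b', 'i', 'g'] := by decide
    have e1 : ("placeholder" : String).toList = ['p', 'l', 'a', 'c', 'e', 'h', 'o', 'l', 'd', 'e', 'r'] := by decide
    have e2 : ("noimage" : String).toList = ['n', 'o', 'i', 'm', 'a', 'g', 'e'] := by decide
    have e3 : ("logo" : String).toList = ['l', 'o', 'g', 'o'] := by decide
    have e4 : ("symbol" : String).toList = ['s', 'y', 'm', 'b', 'o', 'l'] := by decide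
    have e5 : ("button" : String).toList = ['b', 'u', 't', 't', 'o', 'n'] := by decide
    have e6 : ("map" : String).toList = ['m', 'a', 'p'] := by decide
    have e7 : ("diagram" : String).toList = ['d', 'i', 'a', 'g', 'r', 'a', 'm'] := by decide
    have e8 : ("locator" : String).toList = ['l', 'o', 'c', 'a', 't', 'o', 'r'] := by decide
    simp only [bMatchAt, min9, bPfx, List.map, List.any_cons, List.any_nil,
      e0, e1, e2, e3, e4, e5, e6, e7, e8, List.isPrefixOf]
    by_cases h : c = 'd' <;> [skip; by_cases h : c = 'p'] <;>
      [skip; skip; by_cases h : c = 'n'] <;> [skip; skip; skip; by_cases h : c = 'l'] <;>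
      [skip; skip; skip; skip; by_cases h : c = 's'] <;>
      [skip; skip; skip; skip; skip; by_cases h : c = 'b'] <;>
      [skip; skip; skip; skip; skip; skip; by_cases h : c = 'm'] <;>
      simp_all [beq_iff_eq, ne_comm]

-- B's scan finds exactly the infix occurrences of the minimal keywords
lemma bScan_iff (cs : List Char) :
    bScan cs = true ↔ ∃ k ∈ min9, k <:+: cs := by
  induction cs with
  | nil =>
    simp only [bScan]
    constructor
    · intro h; cases h
    · rintro ⟨k, hk, hinf⟩
      have : k = [] := List.eq_nil_of_infix_nil hinf
      subst this; exact absurd hk (by decide)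
  | cons c rest ih =>
    simp only [bScan, bMatchAt_eq]
    cases h : min9.any (fun k => k.isPrefixOf (c :: rest)) with
    | true =>
      simp only [if_true, true_iff]
      obtain ⟨k, hk, hp⟩ := List.any_eq_true.mp h
      exact ⟨k, hk, (List.isPrefixOf_iff_prefix.mp hp).isInfix⟩
    | false =>
      simp only [Bool.false_eq_true, if_false, ih]
      constructor
      · rintro ⟨k, hk, hinf⟩; exact ⟨k, hk, List.infix_cons_iff.mpr (Or.inr hinf)⟩
      · rintro ⟨k, hk, hinf⟩
        rcases List.infix_cons_iff.mp hinf with hp | hinf'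
        · have hT : min9.any (fun k => k.isPrefixOf (c :: rest)) = true :=
            List.any_eq_true.mpr ⟨k, hk, by simpa [List.isPrefixOf_iff_prefix] using hp⟩
          rw [hT] at h; cases h
        · exact ⟨k, hk, hinf'⟩

lemma aLoop_eq_bScan (u : String) : aLoop u badKeywordsA = bScan u.toList := by
  have bridge : (∃ k ∈ badKeywordsA, PySem.Str.isIn k u = true) ↔ ∃ k ∈ min9, k <:+: u.toList := by
    rw [← exists13_iff_exists9]
    constructor
    · rintro ⟨k, hk, hin⟩
      exact ⟨k, hk, (PySem.Chars.isIn_iff_infix _ _).mp (by rwa [PySem.Str.isIn_eq] at hin)⟩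
    · rintro ⟨k, hk, hinf⟩
      exact ⟨k, hk, by rw [PySem.Str.isIn_eq]; exact (PySem.Chars.isIn_iff_infix _ _).mpr hinf⟩
  cases hA : aLoop u badKeywordsA with
  | true => exact ((bScan_iff _).mpr (bridge.mp ((aLoop_iff u).mp hA))).symm
  | false =>
    cases hB : bScan u.toList with
    | false => rfl
    | true =>
      have := (aLoop_iff u).mpr (bridge.mpr ((bScan_iff _).mp hB))
      rw [hA] at this; exact absurd this (by simp)

-- ===== VERDICT (by name: the statement is the Claim_ definition above) =====
theorem is_bad_image_url_py_spec : Claim_equal_is_bad_image_url_py := by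
  intro url _
  unfold Spec_is_bad_image_url_py is_bad_image_url_py is_bad_image_url_py_alt
  by_cases he : url = ""
  · simp [he]
  · simp only [he, if_false]
    rw [aLoop_eq_bScan, PySem.Str.toList_lower]
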